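-- pv_equiv track=rewrite | github.com/mohammadfaiizan/ProjectI | DSA/Problem/Trie/06_Bit_Manipulation_Optimization/1178_Number_of_Valid_Words_for_Each_Puzzle.py | find_num_words_brute_force
-- ===== SOURCE A (Python) =====
-- from typing import List, Dict, Set
--
-- def find_num_words_brute_force(words: List[str], puzzles: List[str]) -> List[int]:
--     """
--     Approach 1: Brute Force with Set Operations
--
--     For each puzzle, check each word using set operations.
--
--     Time: O(w * p * (len(word) + len(puzzle)))
--     Space: O(len(puzzle)) for set operations
--     """
--     result = []
--
--     for puzzle in puzzles:
--         puzzle_set = set(puzzle)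
--         first_letter = puzzle[0]
--         count = 0
--
--         for word in words:
--             # Check if word contains first letter of puzzle
--             if first_letter not in word:
--                 continue
--
--             # Check if all letters in word are in puzzle
--             word_set = set(word)
--             if word_set.issubset(puzzle_set):
--                 count += 1
--
--         result.append(count)
--
--     return result
-- ===== SOURCE B (Python) =====
-- def _subset_count(freq, chars, acc):
--     # sum of freq over all masks of the form acc | (bits of a subset of chars)
--     if not chars:
--         return freq.get(acc, 0)
--     return (_subset_count(freq, chars[1:], acc)
--             + _subset_count(freq, chars[1:], acc | (1 << ord(chars[0]))))
--
--
-- def find_num_words_brute_force(words, puzzles):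
--     # one pass: frequency table of word bitmasks
--     freq = {}
--     for word in words:
--         m = 0
--         for ch in word:
--             m |= 1 << ord(ch)
--         freq[m] = freq.get(m, 0) + 1
--
--     result = []
--     for puzzle in puzzles:
--         first = 1 << ord(puzzle[0])
--         # distinct characters of puzzle other than the first letter
--         seen = first
--         rest = []
--         for ch in puzzle:
--             b = 1 << ord(ch)
--             if seen & b == 0:
--                 seen |= b
--                 rest.append(ch)
--         # enumerate every subset of puzzle letters containing the first letter
--         result.append(_subset_count(freq, rest, first))
--     return result
-- ===== Notes on version B (the rewrite author's own statement) =====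
-- stated objective: faster
-- what changed: B builds a frequency table of word bitmasks in one pass, then answers each puzzle by recursively enumerating the subsets of the puzzle's distinct letters that contain the first letter and summing table lookups, so the per-puzzle scan over all words disappears.
import Mathlib
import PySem

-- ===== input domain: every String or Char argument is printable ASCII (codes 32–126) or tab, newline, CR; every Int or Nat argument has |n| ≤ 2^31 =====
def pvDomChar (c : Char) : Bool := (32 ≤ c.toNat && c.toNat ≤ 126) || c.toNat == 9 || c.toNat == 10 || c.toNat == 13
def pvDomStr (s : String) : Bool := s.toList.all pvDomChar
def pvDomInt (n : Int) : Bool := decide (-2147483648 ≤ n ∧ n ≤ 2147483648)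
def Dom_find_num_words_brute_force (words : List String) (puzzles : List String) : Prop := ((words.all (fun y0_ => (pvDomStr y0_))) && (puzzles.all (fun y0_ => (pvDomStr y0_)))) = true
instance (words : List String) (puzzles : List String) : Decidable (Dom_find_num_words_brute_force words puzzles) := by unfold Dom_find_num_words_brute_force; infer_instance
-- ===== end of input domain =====

-- B replaces A's per-(word,puzzle) set test by a frequency table of word bitmasks built once,
-- queried per puzzle by recursive enumeration of the subsets of its distinct letters that
-- contain the first letter (objective: faster — the per-puzzle scan over all words disappears).

-- ===== PORT A =====
-- literal port of A: for each puzzle build set(puzzle), take puzzle[0], scan all words,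
-- skip words missing the first letter, count those whose set is a subset of the puzzle set.
def find_num_words_brute_force (words : List String) (puzzles : List String) : List Int :=
  puzzles.foldl (fun result puzzle =>
    let puzzle_set : PySem.Set Char := PySem.Set.ofList puzzle.toList
    match PySem.Str.pyGet? puzzle 0 with
    | none => result  -- puzzle[0] raises IndexError in Python (empty puzzle); excluded by Pre_
    | some first_letter =>
      let count : Int := words.foldl (fun count word =>
        if ¬ (word.toList.contains first_letter) then count
        else
          let word_set : PySem.Set Char := PySem.Set.ofList word.toList
          if PySem.Set.issubset word_set puzzle_set then count + 1 else count) 0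
      result ++ [count]) []

-- ===== PORT B =====
-- _subset_count(freq, chars, acc): sum of freq over all masks acc | (bits of a subset of chars)
def pvSubsetCount (freq : PySem.Dict Nat Int) (chars : List Char) (acc : Nat) : Int :=
  match chars with
  | [] => freq.getD acc 0
  | c :: rest => pvSubsetCount freq rest acc + pvSubsetCount freq rest (acc ||| (1 <<< c.toNat))

def find_num_words_brute_force_alt (words : List String) (puzzles : List String) : List Int :=
  let freq := words.foldl (fun d word =>
      let m := word.toList.foldl (fun m ch => m ||| (1 <<< ch.toNat)) 0
      d.modify m 0 (· + 1)) (PySem.Dict.mk ([] : List (Nat × Int)))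
  puzzles.foldl (fun result puzzle =>
    match PySem.Str.pyGet? puzzle 0 with
    | none => result  -- puzzle[0] raises IndexError in Python (empty puzzle); excluded by Pre_
    | some c0 =>
      let first := 1 <<< c0.toNat
      let sr := puzzle.toList.foldl (fun (sr : Nat × List Char) ch =>
          let b := 1 <<< ch.toNat
          if sr.1 &&& b == 0 then (sr.1 ||| b, sr.2 ++ [ch]) else sr) (first, ([] : List Char))
      result ++ [pvSubsetCount freq sr.2 first]) []

-- ===== PRECONDITION & SPEC =====
-- Pre_ excludes inputs containing an empty puzzle string: there Python's puzzle[0] raises IndexError.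
def Pre_find_num_words_brute_force (words : List String) (puzzles : List String) : Prop :=
  ∀ p ∈ puzzles, p ≠ ""
instance (words : List String) (puzzles : List String) : Decidable (Pre_find_num_words_brute_force words puzzles) := by unfold Pre_find_num_words_brute_force; infer_instance
def pvWitness_find_num_words_brute_force : List String × List String := (["apple", "pleas"], ["aelwxyz", "pa"])
def Spec_find_num_words_brute_force (words : List String) (puzzles : List String) (out : List Int) : Prop := out = find_num_words_brute_force_alt words puzzles
instance (words : List String) (puzzles : List String) (out : List Int) : Decidable (Spec_find_num_words_brute_force words puzzles out) := by unfold Spec_find_num_words_brute_force; infer_instance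

-- ===== CLAIM (what is proved, stated in full; the proofs are below) =====
def Claim_equal_find_num_words_brute_force : Prop := ∀ (words : List String) (puzzles : List String), Dom_find_num_words_brute_force words puzzles → Pre_find_num_words_brute_force words puzzles → Spec_find_num_words_brute_force words puzzles (find_num_words_brute_force words puzzles)

-- ===== LEMMAS AND PROOFS =====

-- character bitmask of a string / or of a char list (proof-side abbreviations)
def pvMask (s : String) : Nat := s.toList.foldl (fun m c => m ||| (1 <<< c.toNat)) 0
def pvBits (l : List Char) : Nat := l.foldl (fun m c => m ||| (1 <<< c.toNat)) 0
-- the frequency table B builds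
def pvFreq (words : List String) : PySem.Dict Nat Int :=
  words.foldl (fun d word =>
      let m := word.toList.foldl (fun m ch => m ||| (1 <<< ch.toNat)) 0
      d.modify m 0 (· + 1)) (PySem.Dict.mk ([] : List (Nat × Int)))

lemma pvChar_toNat_inj {c d : Char} (h : c.toNat = d.toNat) : c = d := by
  apply Char.ext; exact UInt32.toNat_inj.mp h

lemma pvTestBit_foldl (l : List Char) (a : Nat) (i : Nat) :
    (l.foldl (fun m c => m ||| (1 <<< c.toNat)) a).testBit i =
      (a.testBit i || l.any (fun c => c.toNat == i)) := by
  induction l generalizing a with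
  | nil => simp
  | cons c t ih =>
    rw [List.foldl_cons, ih, List.any_cons]
    cases h : (c.toNat == i) <;>
      simp_all [Nat.testBit_or, Nat.shiftLeft_eq, Bool.or_comm]

lemma pvTestBit_mask (s : String) (i : Nat) :
    (pvMask s).testBit i = s.toList.any (fun c => c.toNat == i) := by
  simp [pvMask, pvTestBit_foldl]

lemma pvTestBit_bits (l : List Char) (i : Nat) :
    (pvBits l).testBit i = l.any (fun c => c.toNat == i) := by
  simp [pvBits, pvTestBit_foldl]

lemma pvTestBit_pow (cb i : Nat) : (1 <<< cb).testBit i = (cb == i) := by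
  rw [Nat.shiftLeft_eq, one_mul, Nat.testBit_two_pow]
  by_cases h : cb = i <;> simp [h]

-- bit test: m & (1 << i) != 0  is exactly  testBit m i
lemma pvAnd_pow_ne (m i : Nat) : (m &&& (1 <<< i) != 0) = m.testBit i := by
  rw [Nat.shiftLeft_eq, one_mul]
  cases h : m.testBit i
  · simp only [bne_eq_false_iff_eq]
    apply Nat.eq_of_testBit_eq
    intro j
    simp only [Nat.testBit_and, Nat.testBit_two_pow, Nat.zero_testBit]
    by_cases hj : i = j
    · subst hj; simp [h]
    · simp [hj]
  · simp only [bne_iff_ne, ne_eq]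
    intro hz
    have := congrArg (fun n => n.testBit i) hz
    simp [Nat.testBit_and, h] at this

-- subset test on masks: m & pm == m  iff every bit of m is a bit of pm
lemma pvAnd_eq_self (m pm : Nat) :
    (m &&& pm == m) = true ↔ ∀ i, m.testBit i = true → pm.testBit i = true := by
  rw [beq_iff_eq]
  constructor
  · intro h i hi
    have := congrArg (fun n => n.testBit i) h
    simp only [Nat.testBit_and, hi, Bool.true_and] at this
    exact this
  · intro h
    apply Nat.eq_of_testBit_eq
    intro i
    simp only [Nat.testBit_and]
    cases hm : m.testBit i
    · simp
    · simp [h i hm]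

-- counting by a split into two disjoint boolean predicates
lemma pvCountP_split (l : List Nat) (p p1 p2 : Nat → Bool)
    (h : ∀ x ∈ l, (p1 x && p2 x) = false ∧ p x = (p1 x || p2 x)) :
    l.countP p = l.countP p1 + l.countP p2 := by
  induction l with
  | nil => simp
  | cons x t ih =>
    have hx := h x (by simp)
    have ht : ∀ y ∈ t, (p1 y && p2 y) = false ∧ p y = (p1 y || p2 y) :=
      fun y hy => h y (List.mem_cons_of_mem _ hy)
    simp only [List.countP_cons, ih ht]
    cases h1 : p1 x <;> cases h2 : p2 x <;> simp_all <;> omega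

-- the frequency table is the multiset of word masks
lemma pvFreq_getD (words : List String) (v : Nat) :
    (pvFreq words).getD v 0 = ((words.map pvMask).count v : Int) := by
  have : pvFreq words
      = (words.map pvMask).foldl (fun d x => d.modify x 0 (· + 1)) (PySem.Dict.mk []) := by
    rw [List.foldl_map]; rfl
  rw [this, PySem.Dict.getD_foldl_modify_add_one]
  simp [PySem.Dict.getD, PySem.Dict.get?]

-- the leaf predicate: m = acc
lemma pvPred_leaf (m acc : Nat) :
    ((acc &&& m == acc) && (m &&& acc == m)) = (m == acc) := by
  by_cases h : m = acc
  · subst h; simp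
  · have hno : ¬((acc &&& m = acc) ∧ (m &&& acc = m)) := by
      rintro ⟨h1, h2⟩
      exact h (by rw [← h2, Nat.and_comm, h1])
    cases h1 : (acc &&& m == acc) <;> cases h2 : (m &&& acc == m) <;>
      simp_all [beq_iff_eq]

-- splitting the subset predicate on one fresh bit cb (cb neither in acc nor in R)
lemma pvAccb (acc cb m : Nat) :
    ((acc ||| (1 <<< cb)) &&& m == (acc ||| (1 <<< cb))) = ((acc &&& m == acc) && m.testBit cb) := by
  by_cases hA : (acc &&& m == acc) = true
  · by_cases hB : m.testBit cb = true
    · have hL : ((acc ||| (1 <<< cb)) &&& m == (acc ||| (1 <<< cb))) = true := by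
        rw [pvAnd_eq_self]
        intro i hi
        rw [Nat.testBit_or, Bool.or_eq_true, pvTestBit_pow] at hi
        rcases hi with hi | hi
        · exact (pvAnd_eq_self acc m).mp hA i hi
        · have : cb = i := by simpa using hi
          subst this; exact hB
      rw [hL, hA, hB]; rfl
    · have hB' : m.testBit cb = false := by simpa using hB
      have hL : ((acc ||| (1 <<< cb)) &&& m == (acc ||| (1 <<< cb))) = false := by
        rw [Bool.eq_false_iff]
        intro h
        have := (pvAnd_eq_self _ m).mp h cb
          (by rw [Nat.testBit_or, pvTestBit_pow]; simp)
        rw [hB'] at this; exact absurd this (by simp)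
      rw [hL, hA, hB']; rfl
  · have hA' : (acc &&& m == acc) = false := by simpa using hA
    have hL : ((acc ||| (1 <<< cb)) &&& m == (acc ||| (1 <<< cb))) = false := by
      rw [Bool.eq_false_iff]
      intro h
      have : (acc &&& m == acc) = true := by
        rw [pvAnd_eq_self]
        intro i hi
        exact (pvAnd_eq_self _ m).mp h i (by rw [Nat.testBit_or, hi]; rfl)
      rw [hA'] at this; exact absurd this (by simp)
    rw [hL, hA']; rfl

lemma pvSub_drop (m acc R cb : Nat) (hm : m.testBit cb = false) :
    (m &&& ((acc ||| (1 <<< cb)) ||| R) == m) = (m &&& (acc ||| R) == m) := by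
  cases h2 : (m &&& (acc ||| R) == m) with
  | true =>
    rw [pvAnd_eq_self]
    intro i hi
    have h' := (pvAnd_eq_self m _).mp h2 i hi
    simp only [Nat.testBit_or, Bool.or_eq_true] at h' ⊢
    rcases h' with h | h
    · exact Or.inl (Or.inl h)
    · exact Or.inr h
  | false =>
    rw [Bool.eq_false_iff]
    intro h
    have hT : (m &&& (acc ||| R) == m) = true := by
      rw [pvAnd_eq_self]
      intro i hi
      have := (pvAnd_eq_self m _).mp h i hi
      rw [Nat.testBit_or, Bool.or_eq_true, Nat.testBit_or, Bool.or_eq_true] at this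
      rw [Nat.testBit_or, Bool.or_eq_true]
      rcases this with (h' | h') | h'
      · exact Or.inl h'
      · rw [pvTestBit_pow] at h'
        have : cb = i := by simpa using h'
        subst this
        rw [hm] at hi; exact absurd hi (by simp)
      · exact Or.inr h'
    rw [h2] at hT; exact absurd hT (by simp)

lemma pvSub_hit_false (m acc R cb : Nat) (hb : acc.testBit cb = false)
    (hR : R.testBit cb = false) (hm : m.testBit cb = true) :
    (m &&& (acc ||| R) == m) = false := by
  rw [Bool.eq_false_iff]
  intro h
  have := (pvAnd_eq_self m _).mp h cb hm
  rw [Nat.testBit_or, hb, hR] at this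
  exact absurd this (by simp)

lemma pvPred_split (m acc cb R : Nat) (hb : acc.testBit cb = false) (hR : R.testBit cb = false) :
    (((acc &&& m == acc) && (m &&& ((acc ||| (1 <<< cb)) ||| R) == m))
      = (((acc &&& m == acc) && (m &&& (acc ||| R) == m))
        || (((acc ||| (1 <<< cb)) &&& m == (acc ||| (1 <<< cb))) && (m &&& ((acc ||| (1 <<< cb)) ||| R) == m))))
    ∧ ((((acc &&& m == acc) && (m &&& (acc ||| R) == m))
        && (((acc ||| (1 <<< cb)) &&& m == (acc ||| (1 <<< cb))) && (m &&& ((acc ||| (1 <<< cb)) ||| R) == m))) = false) := by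
  by_cases hm : m.testBit cb = true
  · rw [pvSub_hit_false m acc R cb hb hR hm, pvAccb, hm]
    constructor
    · cases hA : (acc &&& m == acc) <;> cases hS : (m &&& ((acc ||| (1 <<< cb)) ||| R) == m) <;> rfl
    · cases hA : (acc &&& m == acc) <;> rfl
  · have hm' : m.testBit cb = false := by simpa using hm
    rw [pvSub_drop m acc R cb hm', pvAccb, hm']
    constructor
    · cases hA : (acc &&& m == acc) <;> cases hS : (m &&& (acc ||| R) == m) <;> rfl
    · cases hA : (acc &&& m == acc) <;> cases hS : (m &&& (acc ||| R) == m) <;> rfl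

lemma pvBits_cons (c : Char) (l : List Char) :
    pvBits (c :: l) = (1 <<< c.toNat) ||| pvBits l := by
  apply Nat.eq_of_testBit_eq
  intro i
  rw [Nat.testBit_or, pvTestBit_pow, pvTestBit_bits, pvTestBit_bits, List.any_cons]

lemma pvBits_append (l : List Char) (ch : Char) :
    pvBits (l ++ [ch]) = pvBits l ||| (1 <<< ch.toNat) := by
  simp [pvBits, List.foldl_append]

lemma pvAnd_pow_eq_zero (m i : Nat) : (m &&& (1 <<< i) == 0) = !m.testBit i := by
  have h := pvAnd_pow_ne m i
  cases hb : m.testBit i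
  · rw [hb] at h
    simp only [bne_eq_false_iff_eq] at h
    rw [h]; rfl
  · rw [hb] at h
    simp only [bne_iff_ne, ne_eq] at h
    simpa using h

-- the subset-sum recursion counts exactly the word masks between acc and acc | bits(chars)
lemma pvSC (words : List String) (chars : List Char) (acc : Nat)
    (hnd : chars.Pairwise (fun a b => a.toNat ≠ b.toNat))
    (hacc : ∀ ch ∈ chars, acc.testBit ch.toNat = false) :
    pvSubsetCount (pvFreq words) chars acc
      = (((words.map pvMask).countP
            (fun m => (acc &&& m == acc) && (m &&& (acc ||| pvBits chars) == m)) : Nat) : Int) := by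
  induction chars generalizing acc with
  | nil =>
    show (pvFreq words).getD acc 0 = _
    rw [pvFreq_getD, List.count_eq_countP]
    congr 2
    funext m
    have hz : acc ||| pvBits [] = acc := by simp [pvBits]
    rw [hz, pvPred_leaf]
  | cons c cs ih =>
    have hcb_cs : ∀ ch ∈ cs, c.toNat ≠ ch.toNat := (List.pairwise_cons.mp hnd).1
    have hnd' := (List.pairwise_cons.mp hnd).2
    have hacc' : ∀ ch ∈ cs, acc.testBit ch.toNat = false :=
      fun ch h => hacc ch (List.mem_cons_of_mem _ h)
    have hacc2 : ∀ ch ∈ cs, (acc ||| (1 <<< c.toNat)).testBit ch.toNat = false := by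
      intro ch h
      rw [Nat.testBit_or, hacc' ch h, pvTestBit_pow]
      simp only [Bool.false_or, beq_eq_false_iff_ne, ne_eq]
      exact hcb_cs ch h
    have hb : acc.testBit c.toNat = false := hacc c (by simp)
    have hR : (pvBits cs).testBit c.toNat = false := by
      rw [pvTestBit_bits, Bool.eq_false_iff]
      intro h
      obtain ⟨ch, hch, he⟩ := List.any_eq_true.mp h
      exact hcb_cs ch hch ((beq_iff_eq.mp he).symm)
    show pvSubsetCount (pvFreq words) cs acc
        + pvSubsetCount (pvFreq words) cs (acc ||| (1 <<< c.toNat)) = _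
    rw [ih acc hnd' hacc', ih (acc ||| (1 <<< c.toNat)) hnd' hacc2]
    simp only [pvBits_cons, ← Nat.or_assoc]
    rw [pvCountP_split (words.map pvMask)
        (fun m => (acc &&& m == acc) && (m &&& ((acc ||| (1 <<< c.toNat)) ||| pvBits cs) == m))
        (fun m => (acc &&& m == acc) && (m &&& (acc ||| pvBits cs) == m))
        (fun m => ((acc ||| (1 <<< c.toNat)) &&& m == (acc ||| (1 <<< c.toNat)))
          && (m &&& ((acc ||| (1 <<< c.toNat)) ||| pvBits cs) == m))
        (fun x _ => ⟨(pvPred_split x acc c.toNat (pvBits cs) hb hR).2,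
                     (pvPred_split x acc c.toNat (pvBits cs) hb hR).1⟩)]
    push_cast
    ring

-- one step of the dedup scan (the loop body of B's per-puzzle pass)
def pvStep (sr : Nat × List Char) (ch : Char) : Nat × List Char :=
  let b := 1 <<< ch.toNat
  if sr.1 &&& b == 0 then (sr.1 ||| b, sr.2 ++ [ch]) else sr

-- the dedup scan: invariant and final value
lemma pvScan (l : List Char) (fb seen : Nat) (rest : List Char)
    (h1 : seen = fb ||| pvBits rest)
    (h2 : rest.Pairwise (fun a b => a.toNat ≠ b.toNat))
    (h3 : ∀ ch ∈ rest, fb.testBit ch.toNat = false) :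
    (l.foldl pvStep (seen, rest)).1 = fb ||| pvBits (l.foldl pvStep (seen, rest)).2
    ∧ (l.foldl pvStep (seen, rest)).2.Pairwise (fun a b => a.toNat ≠ b.toNat)
    ∧ (∀ ch ∈ (l.foldl pvStep (seen, rest)).2, fb.testBit ch.toNat = false)
    ∧ (∀ i, ((l.foldl pvStep (seen, rest)).1).testBit i
          = (seen.testBit i || l.any (fun c => c.toNat == i))) := by
  induction l generalizing seen rest with
  | nil => exact ⟨h1, h2, h3, by simp⟩
  | cons ch l ih =>
    rw [List.foldl_cons]
    by_cases hcond : (seen &&& (1 <<< ch.toNat) == 0) = true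
    · have hsb : seen.testBit ch.toNat = false := by
        rw [pvAnd_pow_eq_zero] at hcond
        simpa using hcond
      have hfb : fb.testBit ch.toNat = false ∧ (pvBits rest).testBit ch.toNat = false := by
        rw [h1, Nat.testBit_or] at hsb
        exact ⟨(Bool.or_eq_false_iff.mp hsb).1, (Bool.or_eq_false_iff.mp hsb).2⟩
      have hred : pvStep (seen, rest) ch = (seen ||| (1 <<< ch.toNat), rest ++ [ch]) := by
        simp [pvStep, hcond]
      rw [hred]
      have h1' : seen ||| (1 <<< ch.toNat) = fb ||| pvBits (rest ++ [ch]) := by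
        rw [pvBits_append, h1, Nat.or_assoc]
      have h2' : (rest ++ [ch]).Pairwise (fun a b => a.toNat ≠ b.toNat) := by
        rw [List.pairwise_append]
        refine ⟨h2, by simp, ?_⟩
        intro a ha b' hb'
        have hbc : b' = ch := by simpa using hb'
        rw [hbc]
        intro he
        have : (pvBits rest).testBit ch.toNat = true := by
          rw [pvTestBit_bits]
          exact List.any_eq_true.mpr ⟨a, ha, beq_iff_eq.mpr he⟩
        rw [hfb.2] at this
        exact absurd this (by simp)
      have h3' : ∀ x ∈ rest ++ [ch], fb.testBit x.toNat = false := by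
        intro x hx
        rcases List.mem_append.mp hx with h | h
        · exact h3 x h
        · have : x = ch := by simpa using h
          subst this; exact hfb.1
      obtain ⟨g1, g2, g3, g4⟩ := ih (seen ||| (1 <<< ch.toNat)) (rest ++ [ch]) h1' h2' h3'
      refine ⟨g1, g2, g3, ?_⟩
      intro i
      rw [g4 i, Nat.testBit_or, pvTestBit_pow, List.any_cons, Bool.or_assoc]
    · have hred : pvStep (seen, rest) ch = (seen, rest) := by
        simp only [pvStep]
        rw [if_neg hcond]
      rw [hred]
      have hsb : seen.testBit ch.toNat = true := by
        rw [pvAnd_pow_eq_zero] at hcond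
        cases h : seen.testBit ch.toNat
        · rw [h] at hcond; exact absurd rfl hcond
        · rfl
      obtain ⟨g1, g2, g3, g4⟩ := ih seen rest h1 h2 h3
      refine ⟨g1, g2, g3, ?_⟩
      intro i
      rw [g4 i, List.any_cons]
      by_cases hi : ch.toNat = i
      · subst hi; simp [hsb]
      · have hne : (ch.toNat == i) = false := by simpa using hi
        rw [hne, Bool.false_or]

-- the first-letter test on masks
lemma pvFirst (cb m : Nat) :
    ((1 <<< cb) &&& m == (1 <<< cb)) = (m &&& (1 <<< cb) != 0) := by
  rw [pvAnd_pow_ne]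
  cases h : m.testBit cb
  · rw [Bool.eq_false_iff]
    intro hT
    have := (pvAnd_eq_self _ m).mp hT cb (by rw [pvTestBit_pow]; simp)
    rw [h] at this; exact absurd this (by simp)
  · rw [pvAnd_eq_self]
    intro i hi
    rw [pvTestBit_pow] at hi
    have : cb = i := by simpa using hi
    subst this; exact h

-- the per-word condition of A as a bitmask condition (from the previous structure of A's loop)
lemma pvCond_eq (w p : String) (c : Char) (hc : c ∈ p.toList) :
    (decide (¬ w.toList.contains c = true) = false ∧
        PySem.Set.issubset (PySem.Set.ofList w.toList) (PySem.Set.ofList p.toList) = true)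
      ↔ ((pvMask w &&& (1 <<< c.toNat) != 0) && (pvMask w &&& pvMask p == pvMask w)) = true := by
  rw [Bool.and_eq_true, pvAnd_pow_ne, pvAnd_eq_self]
  constructor
  · rintro ⟨h1, h2⟩
    simp only [decide_eq_false_iff_not, not_not, List.contains_eq_mem, decide_eq_true_eq] at h1
    constructor
    · rw [pvTestBit_mask]; simp only [List.any_eq_true, beq_iff_eq]; exact ⟨c, h1, rfl⟩
    · intro i hi
      rw [pvTestBit_mask] at hi ⊢
      simp only [List.any_eq_true, beq_iff_eq] at hi ⊢
      obtain ⟨x, hx, hxi⟩ := hi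
      have hsub := (PySem.Set.issubset_iff _ _).mp h2 x (by simpa [PySem.Set.mem_ofList] using hx)
      exact ⟨x, by simpa [PySem.Set.mem_ofList] using hsub, hxi⟩
  · rintro ⟨h1, h2⟩
    rw [pvTestBit_mask] at h1
    simp only [List.any_eq_true, beq_iff_eq] at h1
    obtain ⟨x, hx, hxc⟩ := h1
    have hxec : x = c := pvChar_toNat_inj hxc
    subst hxec
    refine ⟨by simp [List.contains_eq_mem, hx], ?_⟩
    rw [PySem.Set.issubset_iff]
    intro y hy
    rw [PySem.Set.mem_ofList] at hy ⊢
    have : (pvMask p).testBit y.toNat = true := by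
      apply h2
      rw [pvTestBit_mask]
      simp only [List.any_eq_true, beq_iff_eq]
      exact ⟨y, hy, rfl⟩
    rw [pvTestBit_mask] at this
    simp only [List.any_eq_true, beq_iff_eq] at this
    obtain ⟨z, hz, hzy⟩ := this
    have : z = y := pvChar_toNat_inj hzy
    subst this; exact hz

-- per-puzzle equality of the two counts (nonempty puzzle)
lemma pvPuzzle_eq (words : List String) (p : String) (c : Char)
    (hg : PySem.Str.pyGet? p 0 = some c) :
    (words.foldl (fun count word =>
        if ¬ (word.toList.contains c) then count
        else if PySem.Set.issubset (PySem.Set.ofList word.toList) (PySem.Set.ofList p.toList)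
          then count + 1 else count) (0 : Int))
    = pvSubsetCount (pvFreq words)
        (p.toList.foldl (fun (sr : Nat × List Char) ch =>
          let b := 1 <<< ch.toNat
          if sr.1 &&& b == 0 then (sr.1 ||| b, sr.2 ++ [ch]) else sr)
          ((1 <<< c.toNat), ([] : List Char))).2 (1 <<< c.toNat) := by
  have hc : c ∈ p.toList := by
    cases hl : p.toList <;>
      simp [PySem.Str.pyGet?, PySem.List.pyGet?, PySem.List.pyIdx?, hl] at hg
    simp [hg]
  -- A's loop is a countP over the word masks
  have hstep : (fun (count : Int) word =>
      if ¬ (word.toList.contains c) then count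
      else if PySem.Set.issubset (PySem.Set.ofList word.toList) (PySem.Set.ofList p.toList)
        then count + 1 else count)
      = (fun (count : Int) word =>
          if ((pvMask word &&& (1 <<< c.toNat) != 0) && (pvMask word &&& pvMask p == pvMask word))
            then count + 1 else count) := by
    funext count word
    by_cases h1 : word.toList.contains c = true
    · by_cases h2 : PySem.Set.issubset (PySem.Set.ofList word.toList) (PySem.Set.ofList p.toList) = true
      · have h1' : c ∈ word.toList := by simpa [List.contains_eq_mem] using h1
        have := (pvCond_eq word p c hc).mp ⟨by simp [h1'], h2⟩
        simp [h1', h2, this]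
      · have : ((pvMask word &&& (1 <<< c.toNat) != 0) && (pvMask word &&& pvMask p == pvMask word)) = false := by
          by_contra hb
          rw [Bool.not_eq_false] at hb
          exact h2 ((pvCond_eq word p c hc).mpr hb).2
        have h1' : c ∈ word.toList := by simpa [List.contains_eq_mem] using h1
        simp [h1', h2, this]
    · have : ((pvMask word &&& (1 <<< c.toNat) != 0) && (pvMask word &&& pvMask p == pvMask word)) = false := by
        by_contra hb
        rw [Bool.not_eq_false] at hb
        have := ((pvCond_eq word p c hc).mpr hb).1
        simp only [decide_eq_false_iff_not, not_not] at this
        exact h1 this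
      have h1' : ¬ (c ∈ word.toList) := by simpa [List.contains_eq_mem] using h1
      simp [h1', this]
  -- B's scan output
  have hscan := pvScan p.toList (1 <<< c.toNat) (1 <<< c.toNat) []
    (by simp [pvBits]) (by simp) (by simp)
  obtain ⟨g1, g2, g3, g4⟩ := hscan
  have hout1 : (p.toList.foldl pvStep ((1 <<< c.toNat), ([] : List Char))).1 = pvMask p := by
    apply Nat.eq_of_testBit_eq
    intro i
    rw [g4 i, pvTestBit_pow, pvTestBit_mask]
    by_cases hi : c.toNat = i
    · have : p.toList.any (fun x => x.toNat == i) = true :=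
        List.any_eq_true.mpr ⟨c, hc, by simp [hi]⟩
      simp [hi, this]
    · simp [hi]
  have hfb2 : (1 <<< c.toNat) ||| pvBits (p.toList.foldl pvStep ((1 <<< c.toNat), ([] : List Char))).2
      = pvMask p := by
    rw [← g1, hout1]
  show _ = pvSubsetCount (pvFreq words) (p.toList.foldl pvStep ((1 <<< c.toNat), ([] : List Char))).2 (1 <<< c.toNat)
  rw [pvSC words _ _ g2 g3, hfb2]
  rw [hstep, PySem.List.foldl_count_if, List.countP_map, zero_add]
  congr 2
  funext m
  simp only [Function.comp_apply]
  rw [pvFirst]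

-- lifting the per-puzzle equality through the two foldl-append loops
lemma pvFold (words : List String) (t : List String) (acc : List Int)
    (hpre : ∀ p ∈ t, p ≠ "") :
    t.foldl (fun result puzzle =>
      let puzzle_set : PySem.Set Char := PySem.Set.ofList puzzle.toList
      match PySem.Str.pyGet? puzzle 0 with
      | none => result
      | some first_letter =>
        let count : Int := words.foldl (fun count word =>
          if ¬ (word.toList.contains first_letter) then count
          else
            let word_set : PySem.Set Char := PySem.Set.ofList word.toList
            if PySem.Set.issubset word_set puzzle_set then count + 1 else count) 0
        result ++ [count]) acc
    = t.foldl (fun result puzzle =>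
      match PySem.Str.pyGet? puzzle 0 with
      | none => result
      | some c0 =>
        let first := 1 <<< c0.toNat
        let sr := puzzle.toList.foldl (fun (sr : Nat × List Char) ch =>
            let b := 1 <<< ch.toNat
            if sr.1 &&& b == 0 then (sr.1 ||| b, sr.2 ++ [ch]) else sr) (first, ([] : List Char))
        result ++ [pvSubsetCount (pvFreq words) sr.2 first]) acc := by
  induction t generalizing acc with
  | nil => rfl
  | cons p t ih =>
    simp only [List.foldl_cons]
    have hp : p ≠ "" := hpre p (by simp)
    obtain ⟨c, cs, hl⟩ : ∃ c cs, p.toList = c :: cs := by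
      cases hl : p.toList with
      | nil => exact absurd (by rw [← String.ofList_toList (s := p), hl]) hp
      | cons c cs => exact ⟨c, cs, rfl⟩
    have hg : PySem.Str.pyGet? p 0 = some c := by
      simp [PySem.Str.pyGet?, PySem.List.pyGet?, PySem.List.pyIdx?, hl]
    simp only [hg]
    rw [pvPuzzle_eq words p c hg]
    exact ih _ (fun q hq => hpre q (List.mem_cons_of_mem _ hq))

-- ===== VERDICT (by name: the statement is the Claim_ definition above) =====
theorem find_num_words_brute_force_spec : Claim_equal_find_num_words_brute_force := by
  intro words puzzles _hdom hpre
  unfold Spec_find_num_words_brute_force find_num_words_brute_force find_num_words_brute_force_alt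
  rw [pvFold words puzzles [] hpre]
  rfl
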